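-- pv_equiv track=rewrite | github.com/Thive-N/sudoku | src/validity.py | getAffectingSquaresBox
-- ===== SOURCE A (Python) =====
-- def getAffectingSquaresBox(board: list[list[int]], row: int, col: int) -> list[tuple[int, int]]:
--     affected = []
--     boxrow = row - row % 3
--     boxcolumn = col - col % 3
--     for i in range(3):
--         for j in range(3):
--             if boxrow+i != row and boxcolumn+j != col:
--                 affected.append((boxrow+i, boxcolumn+j))
--
--     return affected
-- ===== SOURCE B (Python) =====
-- def getAffectingSquaresBox(board: list[list[int]], row: int, col: int) -> list[tuple[int, int]]:
--     # Closed form: the two box rows other than `row` are br + (the two offsets in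
--     # {0,1,2} ascending, skipping row % 3), and likewise for columns; no loops.
--     rm, cm = row % 3, col % 3
--     br, bc = row - rm, col - cm
--     r1 = br + (1 if rm == 0 else 0)
--     r2 = br + (1 if rm == 2 else 2)
--     c1 = bc + (1 if cm == 0 else 0)
--     c2 = bc + (1 if cm == 2 else 2)
--     return [(r1, c1), (r1, c2), (r2, c1), (r2, c2)]
-- ===== Notes on version B (the rewrite author's own statement) =====
-- stated objective: simpler
-- what changed: B replaces A's nested 3x3 loop-and-filter by loop-free closed-form arithmetic: from row%3 and col%3 it computes the two remaining box rows and columns directly and returns the four cells as an explicit literal list in A's order.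
import Mathlib
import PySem

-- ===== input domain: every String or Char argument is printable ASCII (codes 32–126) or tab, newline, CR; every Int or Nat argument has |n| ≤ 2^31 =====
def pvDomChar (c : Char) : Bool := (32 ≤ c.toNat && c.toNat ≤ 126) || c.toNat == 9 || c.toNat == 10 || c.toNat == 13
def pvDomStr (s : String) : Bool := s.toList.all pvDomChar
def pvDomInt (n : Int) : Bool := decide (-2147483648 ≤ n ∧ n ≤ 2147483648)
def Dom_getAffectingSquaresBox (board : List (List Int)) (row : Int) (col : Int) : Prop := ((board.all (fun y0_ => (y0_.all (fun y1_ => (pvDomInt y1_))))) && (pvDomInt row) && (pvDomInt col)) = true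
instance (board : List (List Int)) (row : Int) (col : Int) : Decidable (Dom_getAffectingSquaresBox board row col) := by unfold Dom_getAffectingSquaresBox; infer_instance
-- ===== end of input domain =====

-- B computes the four affected box cells by closed-form arithmetic on row%3 / col%3 instead of A's nested 3x3 loop with a filter (objective: simpler); same return value.
-- ===== PORT A =====
-- port of A: nested loop over range(3) × range(3), appending when the cell shares neither row nor col
def getAffectingSquaresBox (board : List (List Int)) (row : Int) (col : Int) : List (Int × Int) :=
  let boxrow := row - PySem.Int.mod row 3
  let boxcolumn := col - PySem.Int.mod col 3
  (PySem.List.pyRange 0 3 1).foldl (fun acc i =>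
    (PySem.List.pyRange 0 3 1).foldl (fun acc j =>
      if boxrow + i ≠ row ∧ boxcolumn + j ≠ col then acc ++ [(boxrow + i, boxcolumn + j)] else acc)
      acc) []

-- ===== PORT B =====
-- port of B: closed-form arithmetic, no loops
def getAffectingSquaresBox_alt (board : List (List Int)) (row : Int) (col : Int) : List (Int × Int) :=
  let rm := PySem.Int.mod row 3
  let cm := PySem.Int.mod col 3
  let br := row - rm
  let bc := col - cm
  let r1 := br + (if rm = 0 then 1 else 0)
  let r2 := br + (if rm = 2 then 1 else 2)
  let c1 := bc + (if cm = 0 then 1 else 0)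
  let c2 := bc + (if cm = 2 then 1 else 2)
  [(r1, c1), (r1, c2), (r2, c1), (r2, c2)]

-- ===== PRECONDITION & SPEC =====
def Spec_getAffectingSquaresBox (board : List (List Int)) (row : Int) (col : Int) (out : List (Int × Int)) : Prop := out = getAffectingSquaresBox_alt board row col
instance (board : List (List Int)) (row : Int) (col : Int) (out : List (Int × Int)) : Decidable (Spec_getAffectingSquaresBox board row col out) := by unfold Spec_getAffectingSquaresBox; infer_instance

-- ===== CLAIM (what is proved, stated in full; the proofs are below) =====
def Claim_equal_getAffectingSquaresBox : Prop := ∀ (board : List (List Int)) (row : Int) (col : Int), Dom_getAffectingSquaresBox board row col → Spec_getAffectingSquaresBox board row col (getAffectingSquaresBox board row col)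

-- ===== LEMMAS AND PROOFS =====

-- ===== VERDICT (by name: the statement is the Claim_ definition above) =====
set_option maxHeartbeats 1000000 in
theorem getAffectingSquaresBox_spec : Claim_equal_getAffectingSquaresBox := by
  intro board row col _
  unfold Spec_getAffectingSquaresBox getAffectingSquaresBox getAffectingSquaresBox_alt
  have h03 : PySem.List.pyRange 0 3 1 = [0, 1, 2] := by decide
  have hr0 : (0:Int) ≤ PySem.Int.mod row 3 := PySem.Int.mod_nonneg row (by omega)
  have hr3 : PySem.Int.mod row 3 < 3 := PySem.Int.mod_lt row (by omega)
  have hc0 : (0:Int) ≤ PySem.Int.mod col 3 := PySem.Int.mod_nonneg col (by omega)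
  have hc3 : PySem.Int.mod col 3 < 3 := PySem.Int.mod_lt col (by omega)
  simp only [h03, List.foldl]
  interval_cases h1 : (PySem.Int.mod row 3) <;> interval_cases h2 : (PySem.Int.mod col 3) <;>
    · try norm_num
      all_goals split_ifs <;> first | rfl | omega
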